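-- pv_equiv track=rewrite | github.com/winterash2/TIL | 2021-06-17-요기요대비문제풀기/백) 3055 BFS 탈출/1.py | expand_water
-- ===== SOURCE A (Python) =====
-- import copy
--
-- def expand_water(graph):
--     n, m = len(graph), len(graph[0])
--     expanded = copy.deepcopy(graph)
--     for y in range(n):
--         for x in range(m):
--             if graph[y][x] == '*':
--                 for d in [(0, -1), (-1, 0), (0, 1), (1, 0)]:
--                     nx = x + d[0]
--                     ny = y + d[1]
--                     if 0 > nx or 0 > ny or nx >= m or ny >= n:
--                         continue
--                     if expanded[ny][nx] == '.' or expanded[ny][nx] == 'S':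
--                         expanded[ny][nx] = '*'
--     return expanded
-- ===== SOURCE B (Python) =====
-- def expand_water(graph):
--     n, m = len(graph), len(graph[0])
--
--     def star(y, x):
--         return 0 <= y < n and 0 <= x < m and graph[y][x] == '*'
--
--     return [['*' if c in ('.', 'S') and (star(y - 1, x) or star(y + 1, x)
--                                          or star(y, x - 1) or star(y, x + 1)) else c
--              for x, c in enumerate(row)]
--             for y, row in enumerate(graph)]
-- ===== Notes on version B (the rewrite author's own statement) =====
-- stated objective: idiomatic
-- what changed: B builds a fresh grid with a pull-style nested comprehension - a cell becomes '*' iff it is '.' or 'S' and some in-bounds neighbor of the ORIGINAL grid is '*' - instead of A's push-style in-place mutation of a deep copy driven from every '*' cell; Pre_ excludes the inputs where A raises IndexError (empty grid, or a row shorter than the first row).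
-- intended difference: On ragged grids where a row extends past the first row's width m and its cell at column m is '.' or 'S' with a '*' immediately to its left, A returns that cell unflooded (its range(m) loop never looks past column m-1) while B floods it to '*', the intended flood-fill of every cell the grid actually contains. — e.g. on expand_water([["*"], ["*", "."]]): A returns [["*"], ["*", "."]], B returns [["*"], ["*", "*"]]
import Mathlib
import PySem

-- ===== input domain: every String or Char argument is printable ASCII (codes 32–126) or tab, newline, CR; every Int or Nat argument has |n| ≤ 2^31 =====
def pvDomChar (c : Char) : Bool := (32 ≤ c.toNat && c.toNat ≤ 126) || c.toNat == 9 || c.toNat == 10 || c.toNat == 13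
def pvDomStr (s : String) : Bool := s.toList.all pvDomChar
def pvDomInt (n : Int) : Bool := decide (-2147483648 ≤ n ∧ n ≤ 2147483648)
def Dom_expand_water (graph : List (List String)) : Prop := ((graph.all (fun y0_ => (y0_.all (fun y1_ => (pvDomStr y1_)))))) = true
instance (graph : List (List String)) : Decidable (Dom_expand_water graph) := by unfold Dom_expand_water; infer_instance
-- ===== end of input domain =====

-- B builds the flooded grid with a fresh pull-style nested comprehension (each output cell computed
-- from the ORIGINAL grid only) instead of A's push-style in-place mutation of a deep copy.

-- ===== PORT A =====
-- graph[y][x] read with nonnegative in-range indices (exact there: Pre_ guarantees in-range)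
def pvCellA (g : List (List String)) (y x : Int) : String :=
  PySem.List.pyGetD (PySem.List.pyGetD g y []) x ""

-- expanded[ny][nx] = '*' with nonnegative in-range indices (exact there)
def pvSetA (g : List (List String)) (y x : Int) (v : String) : List (List String) :=
  g.set y.toNat ((g.getD y.toNat []).set x.toNat v)

def expand_water (graph : List (List String)) : List (List String) :=
  let n : Int := graph.length
  let m : Int := ((PySem.List.pyGet? graph 0).getD []).length
  -- expanded = copy.deepcopy(graph)
  (PySem.List.pyRange 0 n 1).foldl (fun exp y =>
    (PySem.List.pyRange 0 m 1).foldl (fun exp x =>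
      if pvCellA graph y x == "*" then
        ([((0 : Int), (-1 : Int)), (-1, 0), (0, 1), (1, 0)]).foldl (fun exp d =>
          let nx := x + d.1
          let ny := y + d.2
          if 0 > nx ∨ 0 > ny ∨ nx ≥ m ∨ ny ≥ n then exp
          else if pvCellA exp ny nx == "." ∨ pvCellA exp ny nx == "S" then pvSetA exp ny nx "*"
          else exp) exp
      else exp) exp) graph

-- ===== PORT B =====
-- star(y, x): inside the n x m region and graph[y][x] == '*'  (reads with in-range indices there)
def pvStarB (g : List (List String)) (m : Int) (y x : Int) : Bool :=
  decide (0 ≤ y ∧ y < (g.length : Int)) &&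
    (decide (0 ≤ x ∧ x < m) && ((g.getD y.toNat []).getD x.toNat "" == "*"))

def expand_water_alt (graph : List (List String)) : List (List String) :=
  -- m = len(graph[0]) (graph[0] read on nonempty grids; Pre_ keeps graph nonempty, exact there)
  let m : Int := ((graph.headD []).length : Int)
  graph.mapIdx (fun y row => row.mapIdx (fun x c =>
    if (c == "." || c == "S") &&
        (pvStarB graph m ((y : Int) - 1) (x : Int) || pvStarB graph m ((y : Int) + 1) (x : Int) ||
         pvStarB graph m (y : Int) ((x : Int) - 1) || pvStarB graph m (y : Int) ((x : Int) + 1))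
    then "*" else c))

-- ===== PRECONDITION & SPEC =====
-- Pre_ excludes exactly the inputs on which A raises IndexError: the empty grid (graph[0]) and
-- grids with a row shorter than the first row (graph[y][x] for x < len(graph[0])).
def Pre_expand_water (graph : List (List String)) : Prop :=
  graph ≠ [] ∧ ∀ row ∈ graph, (graph.headD []).length ≤ row.length
instance (graph : List (List String)) : Decidable (Pre_expand_water graph) := by
  unfold Pre_expand_water; infer_instance

def pvWitness_expand_water : List (List String) := [["*", "."], ["S", "#"]]

-- On ragged grids with a row extending past the first row's width m whose cell at column m is '.' or 'S'
-- next to a '*' at column m-1, A returns that cell unflooded (its range(m) loop never looks past column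
-- m-1) while B floods it to '*', the intended flood-fill of every cell the grid actually contains.
def D_expand_water (graph : List (List String)) : Prop :=
  ∃ row ∈ graph,
    (graph.headD []).length < row.length ∧
    (row.getD (graph.headD []).length "" = "." ∨ row.getD (graph.headD []).length "" = "S") ∧
    1 ≤ (graph.headD []).length ∧
    row.getD ((graph.headD []).length - 1) "" = "*"
instance (graph : List (List String)) : Decidable (D_expand_water graph) := by
  unfold D_expand_water; infer_instance

def Spec_expand_water (graph : List (List String)) (out : List (List String)) : Prop :=
  ¬ D_expand_water graph → out = expand_water_alt graph
instance (graph : List (List String)) (out : List (List String)) : Decidable (Spec_expand_water graph out) := by unfold Spec_expand_water; infer_instance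

def pvDiffWitness_expand_water : List (List String) := [["*"], ["*", "."]]
def pvDiffWitnessOut_expand_water : (List (List String)) × (List (List String)) :=
  ([["*"], ["*", "."]], [["*"], ["*", "*"]])

-- ===== CLAIM (what is proved, stated in full; the proofs are below) =====
def Claim_unchanged_expand_water : Prop := ∀ (graph : List (List String)), Dom_expand_water graph → Pre_expand_water graph → Spec_expand_water graph (expand_water graph)
def Claim_changed_expand_water : Prop := Dom_expand_water (pvDiffWitness_expand_water) ∧ Pre_expand_water (pvDiffWitness_expand_water) ∧ D_expand_water (pvDiffWitness_expand_water) ∧ expand_water (pvDiffWitness_expand_water) = pvDiffWitnessOut_expand_water.1 ∧ expand_water_alt (pvDiffWitness_expand_water) = pvDiffWitnessOut_expand_water.2 ∧ pvDiffWitnessOut_expand_water.1 ≠ pvDiffWitnessOut_expand_water.2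
def Claim_exact_expand_water : Prop := ∀ (graph : List (List String)), Dom_expand_water graph → Pre_expand_water graph → D_expand_water graph → expand_water graph ≠ expand_water_alt graph

-- ===== LEMMAS AND PROOFS =====

-- cell of a grid at Nat coordinates, total with defaults
def cellN (g : List (List String)) (y x : Nat) : String := (g.getD y []).getD x ""

-- original cell is floodable ('.' or 'S')
def okC (g : List (List String)) (y x : Nat) : Bool := (cellN g y x == ".") || (cellN g y x == "S")

-- (y,x) is a 4-neighbor of the Int position p
def adjB (p : Int × Int) (y x : Nat) : Bool :=
  decide ((((y : Int) = p.1) ∧ ((x : Int) + 1 = p.2 ∨ (x : Int) = p.2 + 1)) ∨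
          (((x : Int) = p.2) ∧ ((y : Int) + 1 = p.1 ∨ (y : Int) = p.1 + 1)))

-- processing position p floods (y,x)
def effB (g : List (List String)) (p : Int × Int) (y x : Nat) : Bool :=
  (cellN g p.1.toNat p.2.toNat == "*") && adjB p y x && decide ((x : Int) < ((g.headD []).length : Int))

-- A's width m = len(graph[0]) as the port computes it
def Mg (g : List (List String)) : Int := ((PySem.List.pyGet? g 0).getD []).length

-- A's per-position step (the body of the nested loops)
def stepA (g : List (List String)) (p : Int × Int) (e : List (List String)) : List (List String) :=
  if pvCellA g p.1 p.2 == "*" then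
    ([((0 : Int), (-1 : Int)), (-1, 0), (0, 1), (1, 0)]).foldl (fun exp d =>
      let nx := p.2 + d.1
      let ny := p.1 + d.2
      if 0 > nx ∨ 0 > ny ∨ nx ≥ Mg g ∨ ny ≥ (g.length : Int) then exp
      else if pvCellA exp ny nx == "." ∨ pvCellA exp ny nx == "S" then pvSetA exp ny nx "*"
      else exp) e
  else e

-- all positions in row-major order
def pairsG (g : List (List String)) : List (Int × Int) :=
  (PySem.List.pyRange 0 (g.length : Int) 1).flatMap (fun y =>
    (PySem.List.pyRange 0 (Mg g) 1).map (fun x => (y, x)))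

lemma Mg_eq (g : List (List String)) (h : g ≠ []) : Mg g = ((g.headD []).length : Int) := by
  cases g with
  | nil => exact absurd rfl h
  | cons a t => simp [Mg, PySem.List.pyGet?, PySem.List.pyIdx?]

lemma foldl_nested_eq_pairs {α β γ : Type} (outer : List α) (inner : List β)
    (f : α → β → γ → γ) (init : γ) :
    outer.foldl (fun e y => inner.foldl (fun e x => f y x e) e) init
      = (outer.flatMap (fun y => inner.map (fun x => (y, x)))).foldl (fun e p => f p.1 p.2 e) init := by
  induction outer generalizing init with
  | nil => rfl
  | cons a t ih => simp only [List.flatMap_cons, List.foldl_append, List.foldl_cons, List.foldl_map, ih]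

lemma expand_A_eq (g : List (List String)) :
    expand_water g = (pairsG g).foldl (fun e p => stepA g p e) g := by
  unfold expand_water pairsG stepA Mg
  exact foldl_nested_eq_pairs _ _ _ _

lemma pvCellA_toNat (g : List (List String)) (y x : Int) (hy : 0 ≤ y) (hx : 0 ≤ x) :
    pvCellA g y x = cellN g y.toNat x.toNat := by
  obtain ⟨a, rfl⟩ := Int.eq_ofNat_of_zero_le hy
  obtain ⟨b, rfl⟩ := Int.eq_ofNat_of_zero_le hx
  simp [pvCellA, cellN]

-- the loop invariant: e agrees with g except that floodable cells marked by F carry '*'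
def InvA (g : List (List String)) (F : Nat → Nat → Bool) (e : List (List String)) : Prop :=
  e.length = g.length ∧
  (∀ y : Nat, (e.getD y []).length = (g.getD y []).length) ∧
  (∀ y x : Nat, y < g.length → x < (g.getD y []).length →
    cellN e y x = if okC g y x && F y x then "*" else cellN g y x)

lemma inv_congr {g : List (List String)} {F F' : Nat → Nat → Bool} {e : List (List String)}
    (h : ∀ y x, y < g.length → x < (g.getD y []).length → F y x = F' y x) :
    InvA g F e → InvA g F' e := by
  rintro ⟨h1, h2, h3⟩
  exact ⟨h1, h2, fun y x hy hx => by rw [h3 y x hy hx, h y x hy hx]⟩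

lemma inv_init (g : List (List String)) : InvA g (fun _ _ => false) g :=
  ⟨rfl, fun _ => rfl, fun y x _ _ => by simp⟩

lemma getD_set_self {α : Type} (l : List α) (a : Nat) (v d : α) (h : a < l.length) :
    (l.set a v).getD a d = v := by
  rw [List.getD_eq_getElem _ _ (by simpa using h)]
  simp

lemma getD_set_ne {α : Type} (l : List α) {a b : Nat} (v : α) (d : α) (h : a ≠ b) :
    (l.set a v).getD b d = l.getD b d := by
  simp [List.getD_eq_getElem?_getD, List.getElem?_set_ne h]

lemma inv_write (g : List (List String)) {F : Nat → Nat → Bool} {e : List (List String)}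
    (hInv : InvA g F e) (qy qx : Int) (h0y : 0 ≤ qy) (h0x : 0 ≤ qx)
    (hy : qy.toNat < g.length) (hx : qx.toNat < (g.getD qy.toNat []).length) :
    InvA g (fun y x => F y x || ((y : Int) == qy && (x : Int) == qx))
      (if pvCellA e qy qx == "." ∨ pvCellA e qy qx == "S" then pvSetA e qy qx "*" else e) := by
  obtain ⟨hlen, hrow, hcell⟩ := hInv
  have hc : pvCellA e qy qx = cellN e qy.toNat qx.toNat := pvCellA_toNat e qy qx h0y h0x
  have hq := hcell qy.toNat qx.toNat hy hx
  have hEqF : ∀ y x : Nat, ¬(y = qy.toNat ∧ x = qx.toNat) → ((y : Int) == qy && (x : Int) == qx) = false := by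
    intro y x hcase
    rcases Decidable.not_and_iff_or_not.mp hcase with h | h
    · have hne : ((y : Int) == qy) = false := by simp; omega
      simp [hne]
    · have hne : ((x : Int) == qx) = false := by simp; omega
      simp [hne]
  have hEqT : (((qy.toNat : Nat) : Int) == qy && ((qx.toNat : Nat) : Int) == qx) = true := by
    simp; omega
  by_cases hok : (okC g qy.toNat qx.toNat && F qy.toNat qx.toNat) = true
  · -- already flooded: cell is '*', no write happens
    rw [hq, if_pos hok] at hc
    rw [if_neg (by rw [hc]; decide)]
    refine ⟨hlen, hrow, fun y x hy' hx' => ?_⟩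
    show cellN e y x = if (okC g y x && (F y x || ((y : Int) == qy && (x : Int) == qx))) = true then "*" else cellN g y x
    by_cases hcase : y = qy.toNat ∧ x = qx.toNat
    · obtain ⟨rfl, rfl⟩ := hcase
      rw [hq, if_pos hok, if_pos]
      rw [Bool.and_eq_true] at hok ⊢
      exact ⟨hok.1, by simp [hok.2]⟩
    · rw [hEqF y x hcase, Bool.or_false]
      exact hcell y x hy' hx'
  · -- not yet flooded: the cell of e equals the original cell
    rw [hq, if_neg hok] at hc
    have hrowlen : qx.toNat < (e.getD qy.toNat []).length := by rw [hrow]; exact hx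
    by_cases hokc : okC g qy.toNat qx.toNat = true
    · -- floodable: the write fires
      have hcond : (pvCellA e qy qx == ".") = true ∨ (pvCellA e qy qx == "S") = true := by
        rw [hc]
        simpa [okC, Bool.or_eq_true] using hokc
      rw [if_pos hcond]
      refine ⟨by simpa [pvSetA] using hlen, ?_, ?_⟩
      · intro y
        by_cases hcase : qy.toNat = y
        · subst hcase
          rw [pvSetA, getD_set_self _ _ _ _ (by omega), List.length_set]
          exact hrow qy.toNat
        · rw [pvSetA, getD_set_ne _ _ _ hcase]
          exact hrow y
      · intro y x hy' hx'
        show cellN (pvSetA e qy qx "*") y x = if (okC g y x && (F y x || ((y : Int) == qy && (x : Int) == qx))) = true then "*" else cellN g y x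
        by_cases hcy : y = qy.toNat
        · subst hcy
          have hset : ∀ x' : Nat, cellN (pvSetA e qy qx "*") qy.toNat x' = ((e.getD qy.toNat []).set qx.toNat "*").getD x' "" := by
            intro x'
            rw [pvSetA, cellN, getD_set_self _ _ _ _ (by omega)]
          by_cases hcx : x = qx.toNat
          · subst hcx
            rw [hset, getD_set_self _ _ _ _ hrowlen, hEqT, if_pos]
            simp [hokc]
          · rw [hset, getD_set_ne _ _ _ (fun h => hcx h.symm), hEqF _ _ (fun h => hcx h.2), Bool.or_false]
            exact hcell qy.toNat x hy' hx'
        · have : cellN (pvSetA e qy qx "*") y x = cellN e y x := by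
            rw [pvSetA, cellN, cellN, getD_set_ne _ _ _ (fun h => hcy h.symm)]
          rw [this, hEqF _ _ (fun h => hcy h.1), Bool.or_false]
          exact hcell y x hy' hx'
    · -- not floodable: no write
      have hokc' : okC g qy.toNat qx.toNat = false := by simpa using hokc
      have hcond : ¬((pvCellA e qy qx == ".") = true ∨ (pvCellA e qy qx == "S") = true) := by
        rw [hc]
        simp [okC] at hokc'
        simp [hokc'.1, hokc'.2]
      rw [if_neg hcond]
      refine ⟨hlen, hrow, fun y x hy' hx' => ?_⟩
      show cellN e y x = if (okC g y x && (F y x || ((y : Int) == qy && (x : Int) == qx))) = true then "*" else cellN g y x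
      by_cases hcase : y = qy.toNat ∧ x = qx.toNat
      · obtain ⟨rfl, rfl⟩ := hcase
        rw [hq, if_neg hok, if_neg (by simp [hokc'])]
      · rw [hEqF y x hcase, Bool.or_false]
        exact hcell y x hy' hx'

lemma inv_dir (g : List (List String))
    (hm : ∀ y : Nat, y < g.length → (g.headD []).length ≤ (g.getD y []).length)
    {F : Nat → Nat → Bool} {e : List (List String)} (hInv : InvA g F e) (ny nx : Int) :
    InvA g (fun y x => F y x ||
        (decide (0 ≤ nx ∧ 0 ≤ ny ∧ nx < ((g.headD []).length : Int) ∧ ny < (g.length : Int)) &&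
          ((y : Int) == ny && (x : Int) == nx)))
      (if 0 > nx ∨ 0 > ny ∨ nx ≥ ((g.headD []).length : Int) ∨ ny ≥ (g.length : Int) then e
       else if pvCellA e ny nx == "." ∨ pvCellA e ny nx == "S" then pvSetA e ny nx "*" else e) := by
  by_cases hg : 0 > nx ∨ 0 > ny ∨ nx ≥ ((g.headD []).length : Int) ∨ ny ≥ (g.length : Int)
  · rw [if_pos hg]
    refine inv_congr (fun y x _ _ => ?_) hInv
    have hd : decide (0 ≤ nx ∧ 0 ≤ ny ∧ nx < ((g.headD []).length : Int) ∧ ny < (g.length : Int)) = false := by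
      rw [decide_eq_false_iff_not]; omega
    rw [hd]
    simp
  · rw [if_neg hg]
    push Not at hg
    have h1 : ny.toNat < g.length := by omega
    have h2 : nx.toNat < (g.getD ny.toNat []).length := by
      have := hm ny.toNat h1
      omega
    have hw := inv_write g hInv ny nx (by omega) (by omega) h1 h2
    refine inv_congr (fun y x _ _ => ?_) hw
    have hd : decide (0 ≤ nx ∧ 0 ≤ ny ∧ nx < ((g.headD []).length : Int) ∧ ny < (g.length : Int)) = true := by
      rw [decide_eq_true_eq]; omega
    rw [hd]
    simp

lemma inv_step (g : List (List String))
    (hm : ∀ y : Nat, y < g.length → (g.headD []).length ≤ (g.getD y []).length)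
    {F : Nat → Nat → Bool} {e : List (List String)} (hInv : InvA g F e) (p : Int × Int)
    (hp : 0 ≤ p.1 ∧ p.1 < (g.length : Int) ∧ 0 ≤ p.2 ∧ p.2 < ((g.headD []).length : Int)) :
    InvA g (fun y x => F y x || effB g p y x) (stepA g p e) := by
  have hne : g ≠ [] := by
    intro h
    subst h
    simp at hp
    omega
  unfold stepA
  rw [Mg_eq g hne]
  by_cases hstar : (pvCellA g p.1 p.2 == "*") = true
  · rw [if_pos hstar]
    have hstar' : cellN g p.1.toNat p.2.toNat = "*" := by
      rw [pvCellA_toNat g p.1 p.2 (by omega) (by omega)] at hstar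
      simpa using hstar
    have I1 := inv_dir g hm hInv (p.1 + -1) (p.2 + 0)
    have I2 := inv_dir g hm I1 (p.1 + 0) (p.2 + -1)
    have I3 := inv_dir g hm I2 (p.1 + 1) (p.2 + 0)
    have I4 := inv_dir g hm I3 (p.1 + 0) (p.2 + 1)
    refine inv_congr (fun y x hy _ => ?_) I4
    rw [effB]
    rw [show (cellN g p.1.toNat p.2.toNat == "*") = true by simpa using hstar']
    rw [Bool.true_and, adjB]
    cases hF : F y x
    · simp only [Bool.false_or]
      rw [Bool.eq_iff_iff]
      simp only [Bool.or_eq_true, Bool.and_eq_true, decide_eq_true_eq, beq_iff_eq]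
      omega
    · simp
  · rw [if_neg hstar]
    refine inv_congr (fun y x _ _ => ?_) hInv
    have hstar' : (cellN g p.1.toNat p.2.toNat == "*") = false := by
      rw [pvCellA_toNat g p.1 p.2 (by omega) (by omega)] at hstar
      simpa using hstar
    simp [effB, hstar']

lemma inv_fold (g : List (List String))
    (hm : ∀ y : Nat, y < g.length → (g.headD []).length ≤ (g.getD y []).length) :
    ∀ (ps : List (Int × Int)) (F : Nat → Nat → Bool) (e : List (List String)),
      (∀ p ∈ ps, 0 ≤ p.1 ∧ p.1 < (g.length : Int) ∧ 0 ≤ p.2 ∧ p.2 < ((g.headD []).length : Int)) →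
      InvA g F e →
      InvA g (fun y x => F y x || ps.any (fun p => effB g p y x))
        (ps.foldl (fun e p => stepA g p e) e) := by
  intro ps
  induction ps with
  | nil =>
    intro F e _ h
    exact inv_congr (fun y x _ _ => by simp) h
  | cons p t ih =>
    intro F e hb h
    have h1 := inv_step g hm h p (hb p (by simp))
    have h2 := ih _ _ (fun q hq => hb q (by simp [hq])) h1
    rw [List.foldl_cons]
    refine inv_congr (fun y x _ _ => ?_) h2
    simp [Bool.or_assoc]

lemma mem_pairs (g : List (List String)) (hne : g ≠ []) (py px : Int)
    (h1 : 0 ≤ py) (h2 : py < (g.length : Int)) (h3 : 0 ≤ px) (h4 : px < ((g.headD []).length : Int)) :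
    (py, px) ∈ pairsG g := by
  simp only [pairsG, List.mem_flatMap, List.mem_map, PySem.List.mem_pyRange_one, Mg_eq g hne]
  exact ⟨py, ⟨h1, h2⟩, px, ⟨h3, h4⟩, rfl⟩

lemma pairs_bounds (g : List (List String)) (hne : g ≠ []) :
    ∀ p ∈ pairsG g, 0 ≤ p.1 ∧ p.1 < (g.length : Int) ∧ 0 ≤ p.2 ∧ p.2 < ((g.headD []).length : Int) := by
  intro p hp
  simp only [pairsG, List.mem_flatMap, List.mem_map, PySem.List.mem_pyRange_one, Mg_eq g hne] at hp
  obtain ⟨py, hpy, px, hpx, rfl⟩ := hp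
  exact ⟨hpy.1, hpy.2, hpx.1, hpx.2⟩

lemma A_inv (g : List (List String)) (hne : g ≠ [])
    (hm : ∀ y : Nat, y < g.length → (g.headD []).length ≤ (g.getD y []).length) :
    InvA g (fun y x => (pairsG g).any (fun p => effB g p y x)) (expand_water g) := by
  rw [expand_A_eq]
  have h := inv_fold g hm (pairsG g) (fun _ _ => false) g (pairs_bounds g hne) (inv_init g)
  exact inv_congr (fun y x _ _ => by simp) h

lemma star_iff (g : List (List String)) (yi xi : Int) :
    pvStarB g ((g.headD []).length : Int) yi xi = true ↔
      ∃ py px : Nat, yi = (py : Int) ∧ xi = (px : Int) ∧ py < g.length ∧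
        px < (g.headD []).length ∧ cellN g py px = "*" := by
  unfold pvStarB
  simp only [Bool.and_eq_true, decide_eq_true_eq, beq_iff_eq]
  constructor
  · rintro ⟨⟨h1, h2⟩, ⟨h3, h4⟩, h5⟩
    exact ⟨yi.toNat, xi.toNat, by omega, by omega, by omega, by omega, h5⟩
  · rintro ⟨py, px, rfl, rfl, hpy, hpx, h5⟩
    exact ⟨⟨by omega, by omega⟩, ⟨by omega, by omega⟩, by simpa [cellN] using h5⟩

lemma any_eff (g : List (List String)) (hne : g ≠ []) (y x : Nat) :
    (pairsG g).any (fun p => effB g p y x) =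
      (decide ((x : Int) < ((g.headD []).length : Int)) &&
       (pvStarB g ((g.headD []).length : Int) ((y : Int) - 1) (x : Int) ||
        pvStarB g ((g.headD []).length : Int) ((y : Int) + 1) (x : Int) ||
        pvStarB g ((g.headD []).length : Int) (y : Int) ((x : Int) - 1) ||
        pvStarB g ((g.headD []).length : Int) (y : Int) ((x : Int) + 1))) := by
  rw [Bool.eq_iff_iff]
  simp only [List.any_eq_true, Bool.and_eq_true, Bool.or_eq_true, decide_eq_true_eq]
  rw [star_iff g, star_iff g, star_iff g, star_iff g]
  constructor
  · rintro ⟨p, hp, he⟩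
    have hb := pairs_bounds g hne p hp
    rw [effB] at he
    simp only [Bool.and_eq_true, beq_iff_eq, adjB, decide_eq_true_eq] at he
    obtain ⟨⟨hstar, hadj⟩, hxm⟩ := he
    refine ⟨hxm, ?_⟩
    have hbn : p.1.toNat < g.length := by omega
    have hbm : p.2.toNat < (g.headD []).length := by omega
    rcases hadj with ⟨h1, h2 | h2⟩ | ⟨h1, h2 | h2⟩
    · exact Or.inr ⟨p.1.toNat, p.2.toNat, by omega, by omega, hbn, hbm, hstar⟩
    · exact Or.inl (Or.inr ⟨p.1.toNat, p.2.toNat, by omega, by omega, hbn, hbm, hstar⟩)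
    · exact Or.inl (Or.inl (Or.inr ⟨p.1.toNat, p.2.toNat, by omega, by omega, hbn, hbm, hstar⟩))
    · exact Or.inl (Or.inl (Or.inl ⟨p.1.toNat, p.2.toNat, by omega, by omega, hbn, hbm, hstar⟩))
  · rintro ⟨hxm, hstars⟩
    have mk : ∀ py px : Nat, py < g.length → px < (g.headD []).length → cellN g py px = "*" →
        (adjB ((py : Int), (px : Int)) y x = true) →
        ∃ p ∈ pairsG g, effB g p y x = true := by
      intro py px hpy hpx hc hadj
      refine ⟨((py : Int), (px : Int)), mem_pairs g hne _ _ (by omega) (by omega) (by omega) (by omega), ?_⟩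
      rw [effB]
      simp only [Bool.and_eq_true, beq_iff_eq, decide_eq_true_eq]
      exact ⟨⟨by simpa [cellN] using hc, hadj⟩, hxm⟩
    rcases hstars with (((⟨py, px, h1, h2, h3, h4, h5⟩ | ⟨py, px, h1, h2, h3, h4, h5⟩) |
            ⟨py, px, h1, h2, h3, h4, h5⟩) | ⟨py, px, h1, h2, h3, h4, h5⟩) <;>
      exact mk py px h3 h4 h5 (by rw [adjB, decide_eq_true_eq]; omega)

lemma alt_length (g : List (List String)) : (expand_water_alt g).length = g.length := by
  simp [expand_water_alt]

lemma alt_rowlen (g : List (List String)) (i : Nat) :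
    ((expand_water_alt g).getD i []).length = (g.getD i []).length := by
  by_cases hi : i < g.length
  · rw [List.getD_eq_getElem _ _ (by simpa [alt_length] using hi), List.getD_eq_getElem _ _ hi]
    simp [expand_water_alt]
  · rw [List.getD_eq_default _ _ (by simpa [alt_length] using hi),
        List.getD_eq_default _ _ (by omega)]

lemma alt_cellN (g : List (List String)) (i j : Nat) (hi : i < g.length)
    (hj : j < (g.getD i []).length) :
    cellN (expand_water_alt g) i j =
      if (okC g i j &&
          (pvStarB g ((g.headD []).length : Int) ((i : Int) - 1) (j : Int) ||
           pvStarB g ((g.headD []).length : Int) ((i : Int) + 1) (j : Int) ||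
           pvStarB g ((g.headD []).length : Int) (i : Int) ((j : Int) - 1) ||
           pvStarB g ((g.headD []).length : Int) (i : Int) ((j : Int) + 1))) = true
      then "*" else cellN g i j := by
  have hgd : g.getD i [] = g[i] := List.getD_eq_getElem g [] hi
  have hj' : j < g[i].length := by rw [← hgd]; exact hj
  have hia : i < (expand_water_alt g).length := by simpa [alt_length] using hi
  rw [cellN, List.getD_eq_getElem (expand_water_alt g) [] hia]
  rw [show (expand_water_alt g)[i]'hia =
        (g[i]'hi).mapIdx (fun x c =>
          if (c == "." || c == "S") &&
              (pvStarB g ((g.headD []).length : Int) ((i : Int) - 1) (x : Int) ||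
               pvStarB g ((g.headD []).length : Int) ((i : Int) + 1) (x : Int) ||
               pvStarB g ((g.headD []).length : Int) (i : Int) ((x : Int) - 1) ||
               pvStarB g ((g.headD []).length : Int) (i : Int) ((x : Int) + 1))
          then "*" else c) from by simp [expand_water_alt]]
  rw [List.getD_eq_getElem _ _ (by simpa using hj')]
  rw [List.getElem_mapIdx]
  have hcg : cellN g i j = g[i][j] := by
    rw [cellN, hgd, List.getD_eq_getElem _ _ hj']
  rw [okC, hcg]

-- off-grid floodable cells (column ≥ m): under ¬D_ no star neighbour can reach them
lemma stars_lt_m (g : List (List String)) (hD : ¬ D_expand_water g) (i j : Nat)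
    (hi : i < g.length) (hj : j < (g.getD i []).length) (hok : okC g i j = true)
    (hs : (pvStarB g ((g.headD []).length : Int) ((i : Int) - 1) (j : Int) ||
           pvStarB g ((g.headD []).length : Int) ((i : Int) + 1) (j : Int) ||
           pvStarB g ((g.headD []).length : Int) (i : Int) ((j : Int) - 1) ||
           pvStarB g ((g.headD []).length : Int) (i : Int) ((j : Int) + 1)) = true) :
    j < (g.headD []).length := by
  by_contra hjm
  simp only [Bool.or_eq_true, star_iff g] at hs
  rcases hs with ((⟨py, px, h1, h2, h3, h4, h5⟩ | ⟨py, px, h1, h2, h3, h4, h5⟩) |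
      ⟨py, px, h1, h2, h3, h4, h5⟩) | ⟨py, px, h1, h2, h3, h4, h5⟩
  · omega
  · omega
  · -- left neighbour: forces j = m and graph[i][m-1] = '*', i.e. D_
    have hgd : g.getD i [] = g[i] := List.getD_eq_getElem g [] hi
    have hij : py = i := by omega
    have hjm' : j = (g.headD []).length := by omega
    have hpx : px = (g.headD []).length - 1 := by omega
    rw [hij, hpx, cellN, hgd] at h5
    apply hD
    refine ⟨g[i], List.getElem_mem hi, by rw [← hgd]; omega, ?_, by omega, h5⟩
    rw [okC, cellN, hgd, hjm'] at hok
    simpa [Bool.or_eq_true] using hok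
  · omega

lemma getElem_eq_cellN (e : List (List String)) (i j : Nat) (h1 : i < e.length)
    (h2 : j < e[i].length) : e[i][j] = cellN e i j := by
  rw [cellN, List.getD_eq_getElem e [] h1, List.getD_eq_getElem _ _ h2]

-- ===== VERDICT (by name: the statements are the Claim_ definitions above) =====
theorem expand_water_spec : Claim_unchanged_expand_water := by
  intro g _ hpre
  unfold Spec_expand_water
  intro hD
  obtain ⟨hne, hrect⟩ := hpre
  have hm : ∀ y : Nat, y < g.length → (g.headD []).length ≤ (g.getD y []).length := by
    intro y hy
    rw [List.getD_eq_getElem g [] hy]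
    exact hrect _ (List.getElem_mem hy)
  clear hrect
  obtain ⟨hlen, hrowl, hcell⟩ := A_inv g hne hm
  apply List.ext_getElem
  · rw [hlen, alt_length]
  · intro i h1 h2
    have hi : i < g.length := by rwa [hlen] at h1
    have e1 : (expand_water g)[i] = (expand_water g).getD i [] := (List.getD_eq_getElem _ _ h1).symm
    have e2 : (expand_water_alt g)[i] = (expand_water_alt g).getD i [] := (List.getD_eq_getElem _ _ h2).symm
    apply List.ext_getElem
    · rw [e1, e2, hrowl i, alt_rowlen g i]
    · intro j hj1 hj2
      have hj : j < (g.getD i []).length := by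
        rw [e1, hrowl i] at hj1
        exact hj1
      rw [getElem_eq_cellN _ _ _ h1 hj1, getElem_eq_cellN _ _ _ h2 hj2]
      rw [hcell i j hi hj]
      beta_reduce
      rw [any_eff g hne i j, alt_cellN g i j hi hj]
      by_cases hok : okC g i j = true
      · by_cases hs : (pvStarB g ((g.headD []).length : Int) ((i : Int) - 1) (j : Int) ||
           pvStarB g ((g.headD []).length : Int) ((i : Int) + 1) (j : Int) ||
           pvStarB g ((g.headD []).length : Int) (i : Int) ((j : Int) - 1) ||
           pvStarB g ((g.headD []).length : Int) (i : Int) ((j : Int) + 1)) = true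
        · have hlt := stars_lt_m g hD i j hi hj hok hs
          rw [hok, hs]
          rw [show (decide ((j : Int) < ((g.headD []).length : Int))) = true by
            rw [decide_eq_true_eq]; omega]
          simp
        · rw [Bool.eq_false_iff.mpr hs] at *
          simp
      · rw [Bool.eq_false_iff.mpr hok]
        simp

theorem expand_water_changed : Claim_changed_expand_water := by
  unfold Claim_changed_expand_water; decide

theorem expand_water_tight : Claim_exact_expand_water := by
  intro g _ hpre hD heq
  obtain ⟨hne, hrect⟩ := hpre
  have hm : ∀ y : Nat, y < g.length → (g.headD []).length ≤ (g.getD y []).length := by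
    intro y hy
    rw [List.getD_eq_getElem g [] hy]
    exact hrect _ (List.getElem_mem hy)
  obtain ⟨row, hrowmem, hlong, hcs, hm1, hstar⟩ := hD
  obtain ⟨i, hi, hrowi⟩ := List.getElem_of_mem hrowmem
  subst hrowi
  have hgd : g.getD i [] = g[i] := List.getD_eq_getElem g [] hi
  have hj : (g.headD []).length < (g.getD i []).length := by rw [hgd]; exact hlong
  -- A leaves the cell at (i, m) untouched
  obtain ⟨hlenA, hrowA, hcellA⟩ := A_inv g hne hm
  have hF : (pairsG g).any (fun p => effB g p i ((g.headD []).length)) = false := by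
    rw [any_eff g hne]
    simp
  have hA := hcellA i ((g.headD []).length) hi (by omega)
  beta_reduce at hA
  rw [hF, Bool.and_false, if_neg (by simp)] at hA
  -- B floods it
  have hcm : cellN g i ((g.headD []).length) = (g[i]'hi).getD (g.headD []).length "" := by
    rw [cellN, hgd]
  have hok : okC g i ((g.headD []).length) = true := by
    rw [okC, hcm]
    rcases hcs with h | h <;> rw [h] <;> decide
  have hs3 : pvStarB g ((g.headD []).length : Int) (i : Int) (((g.headD []).length : Int) - 1) = true := by
    rw [star_iff g]
    refine ⟨i, (g.headD []).length - 1, rfl, by omega, hi, by omega, ?_⟩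
    rw [cellN, hgd]
    exact hstar
  have hB := alt_cellN g i ((g.headD []).length) hi (by omega)
  rw [hok, hs3, Bool.true_and] at hB
  rw [if_pos (by simp)] at hB
  -- the two grids disagree at (i, m)
  have : cellN (expand_water g) i ((g.headD []).length) =
      cellN (expand_water_alt g) i ((g.headD []).length) := by rw [heq]
  rw [hA, hB, hcm] at this
  rcases hcs with h | h <;> rw [h] at this <;> exact absurd this (by decide)
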